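-- pv_equiv track=rewrite | github.com/calico/borzoi | src/scripts/w5_qc.py | genome_chr_pos
-- ===== SOURCE A (Python) =====
-- def genome_chr_pos(gi, chr_lens):
--     """ Compute chromosome and position for a genome index.
--
--         Args
--          gi (int): Genomic index
--          chr_lens (OrderedDict): Chromosome lengths
--
--         Returns:
--          chrm (str): Chromosome
--          pos (int): Position
--         """
--
--     chrms_list = list(chr_lens.keys())
--     lengths_list = list(chr_lens.values())
--
--     # chromosome index
--     ci = 0
--
--     # helper counters
--     gii = 0
--     cii = 0
--
--     # while gi is beyond this chromosome
--     while ci < len(lengths_list) and gi - gii > lengths_list[ci]: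
--       # advance genome index
--       gii += lengths_list[ci]
--
--       # advance chromosome
--       ci += 1
--
--     # we shouldn't be beyond the chromosomes
--     assert (ci < len(lengths_list))
--
--     # set position
--     pos = gi - gii
--
--     return chrms_list[ci], pos
-- ===== SOURCE B (Python) =====
-- from itertools import accumulate
--
--
-- def genome_chr_pos(gi, chr_lens):
--     """Compute chromosome and position for a genome index (cumulative-ends array)."""
--     ends = list(accumulate(chr_lens.values()))
--     ci = next(i for i, e in enumerate(ends) if gi <= e)
--     return list(chr_lens.keys())[ci], gi - (ends[ci - 1] if ci else 0)
-- ===== Notes on version B (the rewrite author's own statement) =====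
-- stated objective: alternative
-- what changed: Replaces A's while-loop with mutable chromosome/offset counters over two index-accessed lists by a precomputed cumulative-ends array (itertools.accumulate), a first-qualifying-index search over it, and an offset read back from the array.
import Mathlib
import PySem

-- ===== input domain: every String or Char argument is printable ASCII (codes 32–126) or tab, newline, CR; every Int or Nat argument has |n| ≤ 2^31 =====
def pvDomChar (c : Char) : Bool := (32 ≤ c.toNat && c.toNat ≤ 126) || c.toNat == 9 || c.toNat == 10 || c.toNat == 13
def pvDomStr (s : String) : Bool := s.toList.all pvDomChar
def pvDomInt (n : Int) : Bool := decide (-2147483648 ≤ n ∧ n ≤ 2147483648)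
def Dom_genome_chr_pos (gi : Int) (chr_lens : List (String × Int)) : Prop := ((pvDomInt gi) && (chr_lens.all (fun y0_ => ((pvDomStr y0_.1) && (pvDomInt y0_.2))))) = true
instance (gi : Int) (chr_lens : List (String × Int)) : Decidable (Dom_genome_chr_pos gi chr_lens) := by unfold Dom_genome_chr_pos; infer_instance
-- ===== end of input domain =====

-- B replaces A's counter while-loop by a cumulative-ends array with a first-qualifying-index search.

-- ===== PORT A =====
-- A's while loop: advance (ci, gii) while gi is beyond chromosome ci.
def pvALoop (gi : Int) (lengths : List Int) (ci : Nat) (gii : Int) : Nat × Int :=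
  if _h : ci < lengths.length ∧ gi - gii > lengths.getD ci 0 then
    pvALoop gi lengths (ci + 1) (gii + lengths.getD ci 0)
  else (ci, gii)
termination_by lengths.length - ci
decreasing_by omega

def genome_chr_pos (gi : Int) (chr_lens : List (String × Int)) : String × Int :=
  let chrms_list := chr_lens.map Prod.fst
  let lengths_list := chr_lens.map Prod.snd
  let r := pvALoop gi lengths_list 0 0
  -- Python asserts r.1 < len here (AssertionError excluded by Pre_)
  (chrms_list.getD r.1 "", gi - r.2)

-- ===== PORT B =====
-- itertools.accumulate
def pvAccum (acc : Int) : List Int → List Int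
  | [] => []
  | l :: ls => (acc + l) :: pvAccum (acc + l) ls

def genome_chr_pos_alt (gi : Int) (chr_lens : List (String × Int)) : String × Int :=
  let ends := pvAccum 0 (chr_lens.map Prod.snd)
  -- next(i for i, e in enumerate(ends) if gi <= e); StopIteration excluded by Pre_
  match ends.findIdx? (fun e => gi ≤ e) with
  | none => ("", 0)
  | some ci =>
    ((chr_lens.map Prod.fst).getD ci "", gi - (if ci = 0 then 0 else ends.getD (ci - 1) 0))

-- ===== PRECONDITION & SPEC =====
-- Pre_ excludes exactly the inputs on which A raises AssertionError (an empty dict, or a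
-- genome index gi beyond every cumulative chromosome end); B raises StopIteration there.
def Pre_genome_chr_pos (gi : Int) (chr_lens : List (String × Int)) : Prop :=
  ∃ k, k < chr_lens.length ∧ gi ≤ (((chr_lens.map Prod.snd).take (k + 1)).sum)
instance (gi : Int) (chr_lens : List (String × Int)) : Decidable (Pre_genome_chr_pos gi chr_lens) := by
  unfold Pre_genome_chr_pos; infer_instance

def pvWitness_genome_chr_pos : Int × (List (String × Int)) := (3, [("chr1", 5)])

def Spec_genome_chr_pos (gi : Int) (chr_lens : List (String × Int)) (out : String × Int) : Prop := out = genome_chr_pos_alt gi chr_lens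
instance (gi : Int) (chr_lens : List (String × Int)) (out : String × Int) : Decidable (Spec_genome_chr_pos gi chr_lens out) := by unfold Spec_genome_chr_pos; infer_instance

-- ===== CLAIM (what is proved, stated in full; the proofs are below) =====
def Claim_equal_genome_chr_pos : Prop := ∀ (gi : Int) (chr_lens : List (String × Int)), Dom_genome_chr_pos gi chr_lens → Pre_genome_chr_pos gi chr_lens → Spec_genome_chr_pos gi chr_lens (genome_chr_pos gi chr_lens)

-- ===== LEMMAS AND PROOFS =====

-- prefix sums: pvS L k = sum of the first k lengths
def pvS (L : List Int) (k : Nat) : Int := (L.take k).sum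

theorem pvS_succ (L : List Int) (k : Nat) (h : k < L.length) :
    pvS L (k + 1) = pvS L k + L.getD k 0 := by
  simp [pvS, List.getD_eq_getElem?_getD, List.getElem?_eq_getElem h,
    List.sum_take_succ L k h]

theorem pvAccum_length (acc : Int) (L : List Int) : (pvAccum acc L).length = L.length := by
  induction L generalizing acc with
  | nil => simp [pvAccum]
  | cons l ls ih => simp [pvAccum, ih]

theorem pvAccum_getD (acc : Int) (L : List Int) :
    ∀ k, k < L.length → (pvAccum acc L).getD k 0 = acc + pvS L (k + 1) := by
  induction L generalizing acc with
  | nil => intro k hk; simp at hk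
  | cons l ls ih =>
    intro k hk
    cases k with
    | zero => simp [pvAccum, pvS]
    | succ k =>
      have := ih (acc + l) k (by simpa using hk)
      simp only [pvAccum, List.getD_cons_succ, this, pvS, List.take_succ_cons,
        List.sum_cons]
      ring

-- A's loop returns the first index c with gi ≤ pvS L (c+1), together with pvS L c
theorem pvALoop_spec (gi : Int) (L : List Int) :
    ∀ d ci gii, L.length - ci ≤ d → gii = pvS L ci →
      (∃ k, ci ≤ k ∧ k < L.length ∧ gi ≤ pvS L (k + 1)) →
      (∀ i, i < ci → pvS L (i + 1) < gi) →
      (pvALoop gi L ci gii).1 < L.length ∧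
      (pvALoop gi L ci gii).2 = pvS L (pvALoop gi L ci gii).1 ∧
      gi ≤ pvS L ((pvALoop gi L ci gii).1 + 1) ∧
      (∀ i, i < (pvALoop gi L ci gii).1 → pvS L (i + 1) < gi) := by
  intro d
  induction d with
  | zero =>
    intro ci gii hd hg hex hlt
    obtain ⟨k, hk1, hk2, hk3⟩ := hex
    omega
  | succ d ih =>
    intro ci gii hd hg hex hlt
    obtain ⟨k, hk1, hk2, hk3⟩ := hex
    have hci : ci < L.length := by omega
    rw [pvALoop]
    by_cases hc : gi - gii > L.getD ci 0
    · have hstep : gi > pvS L (ci + 1) := by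
        rw [pvS_succ L ci hci]; omega
      have hkne : ci ≠ k := by
        intro h; subst h; omega
      simp only [dif_pos (And.intro hci hc)]
      refine ih (ci + 1) (gii + L.getD ci 0) (by omega) ?_ ⟨k, by omega, hk2, hk3⟩ ?_
      · rw [pvS_succ L ci hci, hg]
      · intro i hi
        rcases Nat.lt_or_ge i ci with h | h
        · exact hlt i h
        · have : i = ci := by omega
          subst this; exact hstep
    · have : ¬ (ci < L.length ∧ gi - gii > L.getD ci 0) := by
        intro h; exact hc h.2
      simp only [dif_neg this]
      refine ⟨hci, hg, ?_, hlt⟩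
      rw [pvS_succ L ci hci]; omega

-- findIdx? returns the first index satisfying p (and none iff there is none)
theorem pvFindIdx_spec (p : Int → Bool) :
    ∀ (l : List Int),
      (∀ i, l.findIdx? p = some i →
        i < l.length ∧ p (l.getD i 0) = true ∧ ∀ j, j < i → p (l.getD j 0) = false) ∧
      (l.findIdx? p = none → ∀ j, j < l.length → p (l.getD j 0) = false) := by
  intro l
  induction l with
  | nil => exact ⟨by intro i h; simp at h, by intro _ j hj; simp at hj⟩
  | cons a l ih =>
    constructor
    · intro i h
      rw [List.findIdx?_cons] at h
      by_cases ha : p a = true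
      · rw [if_pos ha] at h
        have : i = 0 := by simpa using h.symm
        subst this
        exact ⟨by simp, by simpa using ha, by intro j hj; omega⟩
      · rw [if_neg ha] at h
        rw [Option.map_eq_some_iff] at h
        obtain ⟨i', hi', rfl⟩ := h
        obtain ⟨h1, h2, h3⟩ := ih.1 i' hi'
        refine ⟨by simpa using h1, by simpa using h2, ?_⟩
        intro j hj
        cases j with
        | zero => simpa using (Bool.eq_false_iff.mpr ha)
        | succ j => simpa using h3 j (by omega)
    · intro h j hj
      rw [List.findIdx?_cons] at h
      by_cases ha : p a = true
      · rw [if_pos ha] at h; simp at h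
      · rw [if_neg ha] at h
        cases j with
        | zero => simpa using (Bool.eq_false_iff.mpr ha)
        | succ j =>
          have hnone : l.findIdx? p = none := by
            cases hfi : l.findIdx? p with
            | none => rfl
            | some i' => rw [hfi] at h; simp at h
          simpa using ih.2 hnone j (by simpa using hj)

theorem genome_chr_pos_spec : Claim_equal_genome_chr_pos := by
  intro gi chr_lens _hdom hpre
  obtain ⟨k, hk, hgik⟩ := hpre
  unfold Spec_genome_chr_pos genome_chr_pos genome_chr_pos_alt
  set L := chr_lens.map Prod.snd with hL
  have hkL : k < L.length := by rw [hL, List.length_map]; exact hk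
  have hgik' : gi ≤ pvS L (k + 1) := hgik
  -- A's side: first index with gi ≤ pvS L (· + 1)
  have hA := pvALoop_spec gi L L.length 0 0 (by omega) (by simp [pvS])
    ⟨k, by omega, hkL, hgik'⟩ (by omega)
  obtain ⟨hA1, hA2, hA3, hA4⟩ := hA
  set cA := (pvALoop gi L 0 0).1 with hcA
  -- B's side: the ends array and findIdx?
  have hends_len : (pvAccum 0 L).length = L.length := pvAccum_length 0 L
  have hends : ∀ j, j < L.length → (pvAccum 0 L).getD j 0 = pvS L (j + 1) := by
    intro j hj
    rw [pvAccum_getD 0 L j hj]; ring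
  have hspec := pvFindIdx_spec (fun e => gi ≤ e) (pvAccum 0 L)
  cases hfi : (pvAccum 0 L).findIdx? (fun e => gi ≤ e) with
  | none =>
    exfalso
    have := hspec.2 hfi k (by omega)
    simp only [hends k hkL, decide_eq_false_iff_not, not_le] at this
    omega
  | some cB =>
    obtain ⟨hB1, hB2, hB3⟩ := hspec.1 cB hfi
    rw [hends_len] at hB1
    rw [hends cB hB1] at hB2
    have hBle : gi ≤ pvS L (cB + 1) := by simpa using hB2
    have hBlo : ∀ i, i < cB → pvS L (i + 1) < gi := by
      intro i hi
      have := hB3 i hi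
      rw [hends i (by omega)] at this
      simpa using this
    -- the two indices coincide
    have hAB : cA = cB := by
      rcases Nat.lt_trichotomy cA cB with h | h | h
      · have := hBlo cA h; omega
      · exact h
      · have := hA4 cB h; omega
    -- offsets coincide
    have hoff : (if cB = 0 then (0 : Int) else (pvAccum 0 L).getD (cB - 1) 0) = pvS L cB := by
      by_cases h0 : cB = 0
      · simp [h0, pvS]
      · rw [if_neg h0, hends (cB - 1) (by omega)]
        congr 1
        omega
    simp only [hfi, ← hcA, hAB, hoff, hA2]
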